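-- pv_equiv track=rewrite | github.com/ryuckel/pjt-euler | euler.py | assume_threshold
-- ===== SOURCE A (Python) =====
-- def assume_threshold(power):
--     digit = 1
--     while True:
--         num = sum([9 * 10 ** (d - 1) for d in range(1, digit + 1)])
--         power_sum = 9 ** power * digit
--         if num > power_sum:
--             return power_sum
--         digit += 1
-- ===== SOURCE B (Python) =====
-- def assume_threshold(power):
--     p = 9 ** power
--
--     def ok(d):
--         return 10 ** d - 1 > p * d
--
--     # exponential search: first power of two satisfying ok
--     hi = 1
--     while not ok(hi):
--         hi *= 2
--     # binary search the single crossing in (lo, hi]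
--     lo = hi // 2
--     while lo + 1 < hi:
--         mid = (lo + hi) // 2
--         if ok(mid):
--             hi = mid
--         else:
--             lo = mid
--     return p * hi
-- ===== Notes on version B (the rewrite author's own statement) =====
-- stated objective: faster
-- what changed: B computes 9**power once and finds the crossing digit by exponential search then binary search on the monotone condition 10**d - 1 > 9**power * d, instead of A's linear scan that rebuilds a list-comprehension geometric sum and recomputes 9**power on every iteration.
-- outside the precondition, e.g. on assume_threshold(-1): A returns 0.1111111111111111, B returns 0.1111111111111111
import Mathlib
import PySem

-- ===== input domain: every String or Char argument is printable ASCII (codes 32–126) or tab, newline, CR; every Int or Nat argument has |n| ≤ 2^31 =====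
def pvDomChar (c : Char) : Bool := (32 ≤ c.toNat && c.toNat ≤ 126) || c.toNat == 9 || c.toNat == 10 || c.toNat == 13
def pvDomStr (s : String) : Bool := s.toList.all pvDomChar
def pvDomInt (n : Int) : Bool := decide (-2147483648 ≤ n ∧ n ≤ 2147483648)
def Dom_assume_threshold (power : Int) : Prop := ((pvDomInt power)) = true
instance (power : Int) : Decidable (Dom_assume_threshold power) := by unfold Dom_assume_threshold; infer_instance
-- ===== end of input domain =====

-- B locates the crossing digit by exponential search followed by binary search on the monotone
-- condition 10^d - 1 > 9^power * d, instead of A's linear scan that rebuilds a comprehension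
-- sum and recomputes 9**power each iteration; measured asymptotically faster.
-- Both loops are ported as structural recursion on an explicit fuel argument; the callers pass
-- fuel proved sufficient (pvKeyInt: the condition holds for every d ≥ 2*power+2), so the
-- fuel-exhausted branch is never reached on any input.

-- ===== PORT A =====
-- For d ≥ 2p+2 the loop condition 10^d - 1 > 9^p * d holds, so fuel 2p+2 is enough.
-- 9 ** power ported as 9 ^ power.toNat: exact for power ≥ 0 (Pre_; Python returns a float for power < 0).
def pvLoopA (power : Int) : Nat → Nat → Int
  | 0, _ => 0  -- unreachable: assume_threshold passes sufficient fuel (pvLoopAChar)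
  | fuel + 1, digit =>
    let num : Int := ((PySem.List.pyRange 1 ((digit : Int) + 1) 1).map (fun d => 9 * 10 ^ (d - 1).toNat)).sum
    let power_sum : Int := 9 ^ power.toNat * (digit : Int)
    if num > power_sum then power_sum else pvLoopA power fuel (digit + 1)

def assume_threshold (power : Int) : Int := pvLoopA power (2 * power.toNat + 2) 1

-- ===== PORT B =====
-- Source B's ok(d)
abbrev pvOk (p : Int) (d : Nat) : Prop := (10 : Int) ^ d - 1 > p * (d : Int)

-- Source B's exponential-search loop: hi *= 2 until ok(hi)
def pvExp (p : Int) : Nat → Nat → Nat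
  | 0, hi => hi  -- unreachable: assume_threshold_alt passes sufficient fuel (pvExp_spec)
  | fuel + 1, hi => if pvOk p hi then hi else pvExp p fuel (hi * 2)

-- Source B's binary-search loop on (lo, hi]
def pvBin (p : Int) : Nat → Nat → Nat → Nat
  | 0, _, hi => hi  -- unreachable: assume_threshold_alt passes sufficient fuel (pvBin_spec)
  | fuel + 1, lo, hi =>
    if lo + 1 < hi then
      if pvOk p ((lo + hi) / 2) then pvBin p fuel lo ((lo + hi) / 2)
      else pvBin p fuel ((lo + hi) / 2) hi
    else hi

-- 9 ** power ported as 9 ^ power.toNat: exact for power ≥ 0 (Pre_).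
def assume_threshold_alt (power : Int) : Int :=
  let p : Int := 9 ^ power.toNat
  let hi := pvExp p (2 * power.toNat + 2) 1
  let lo := hi / 2
  p * (pvBin p hi lo hi : Int)

-- ===== PRECONDITION & SPEC =====
-- Pre_ excludes negative power, on which 9 ** power is a Python float and A returns a float, not an int.
def Pre_assume_threshold (power : Int) : Prop := 0 ≤ power
instance (power : Int) : Decidable (Pre_assume_threshold power) := by unfold Pre_assume_threshold; infer_instance
def pvWitness_assume_threshold : Int := (2)

def Spec_assume_threshold (power : Int) (out : Int) : Prop := out = assume_threshold_alt power
instance (power : Int) (out : Int) : Decidable (Spec_assume_threshold power out) := by unfold Spec_assume_threshold; infer_instance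

-- ===== CLAIM (what is proved, stated in full; the proofs are below) =====
def Claim_equal_assume_threshold : Prop := ∀ (power : Int), Dom_assume_threshold power → Pre_assume_threshold power → Spec_assume_threshold power (assume_threshold power)

-- ===== LEMMAS AND PROOFS =====

-- For d ≥ 2p+2 the loop condition 10^d - 1 > 9^p * d holds: both searches stop within their fuel.
theorem pvKeyNat (p : Nat) : ∀ (d : Nat), 2 * p + 2 ≤ d → 9 ^ p * d + 1 < 10 ^ d := by
  have ha : p + 1 ≤ 9 ^ p := by
    calc p + 1 ≤ 2 ^ p := Nat.succ_le_of_lt (Nat.lt_two_pow_self)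
    _ ≤ 9 ^ p := Nat.pow_le_pow_left (by norm_num) p
  intro d hd
  induction d with
  | zero => omega
  | succ n ih =>
    rcases Nat.lt_or_ge n (2 * p + 2) with hlt | hge
    · have hn : n + 1 = 2 * p + 2 := by omega
      rw [hn] at *
      have h1 : 9 ^ p * 9 ^ p ≤ 10 ^ (2 * p) := by
        have : (9 : Nat) ^ p ≤ 10 ^ p := Nat.pow_le_pow_left (by norm_num) p
        calc 9 ^ p * 9 ^ p ≤ 10 ^ p * 10 ^ p := Nat.mul_le_mul this this
        _ = 10 ^ (2 * p) := by rw [← pow_add]; ring_nf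
      have h2 : 10 ^ (2 * p + 2) = 10 ^ (2 * p) * 100 := by rw [pow_add]; norm_num
      have h3 : 1 ≤ 9 ^ p := Nat.one_le_pow _ _ (by norm_num)
      nlinarith [h1, h2, ha, h3]
    · have hih := ih hge
      have h3 : 1 ≤ 9 ^ p := Nat.one_le_pow _ _ (by norm_num)
      have h4 : 10 ^ (n + 1) = 10 * 10 ^ n := by rw [pow_succ]; ring
      nlinarith [hih, h3, h4, hge]

-- Int form, contrapositive: if the condition fails then d < 2p+2.
theorem pvKeyInt (p d : Nat) (h : ¬ ((10 : Int) ^ d - 1 > 9 ^ p * (d : Int))) : d < 2 * p + 2 := by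
  by_contra hc
  apply h
  have := pvKeyNat p d (by omega)
  have : ((9 ^ p * d + 1 : Nat) : Int) < ((10 ^ d : Nat) : Int) := by exact_mod_cast this
  push_cast at this
  linarith

-- value of A's per-iteration comprehension sum
theorem pvSumA : ∀ (n : Nat),
    (((PySem.List.pyRange 1 ((n : Int) + 1) 1).map (fun d => 9 * 10 ^ (d - 1).toNat)).sum : Int)
      = 10 ^ n - 1 := by
  intro n
  induction n with
  | zero => simp [PySem.List.pyRange_one_eq_nil (by norm_num : (1:Int) ≤ 1)]
  | succ n ih =>
    have hsplit : PySem.List.pyRange 1 ((((n : Nat) + 1 : Nat) : Int) + 1) 1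
        = PySem.List.pyRange 1 ((n : Int) + 1) 1 ++ [(n : Int) + 1] := by
      push_cast
      exact PySem.List.pyRange_one_succ_right (by omega)
    rw [hsplit, List.map_append, List.sum_append, ih]
    simp only [List.map_cons, List.map_nil, List.sum_cons, List.sum_nil, add_sub_cancel_right,
      Int.toNat_natCast, pow_succ]
    ring

-- once true (for d ≥ 1), the condition stays true
theorem pvOkStep (pn d : Nat) (hd : 1 ≤ d) (h : pvOk (9 ^ pn) d) : pvOk (9 ^ pn) (d + 1) := by
  unfold pvOk at *
  have hp1 : (1 : Int) ≤ 9 ^ pn := one_le_pow₀ (by norm_num)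
  have hd1 : (1 : Int) ≤ (d : Int) := by exact_mod_cast hd
  have hpd : (9 : Int) ^ pn ≤ 9 ^ pn * (d : Int) := le_mul_of_one_le_right (by linarith) hd1
  push_cast
  have h10 : (10 : Int) ^ (d + 1) = 10 * 10 ^ d := by rw [pow_succ]; ring
  nlinarith [h, hpd, hp1]

theorem pvOkMono (pn : Nat) (d e : Nat) (hd : 1 ≤ d) (hde : d ≤ e) (h : pvOk (9 ^ pn) d) :
    pvOk (9 ^ pn) e := by
  induction e with
  | zero => omega
  | succ n ih =>
    rcases Nat.lt_or_ge d (n + 1) with hlt | hge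
    · exact pvOkStep pn n (by omega) (ih (by omega))
    · have : d = n + 1 := by omega
      rwa [this] at h

-- the crossing point is unique
theorem pvUniq (pn r s : Nat) (hr1 : 1 ≤ r) (hs1 : 1 ≤ s)
    (hr : pvOk (9 ^ pn) r) (hr' : ¬ pvOk (9 ^ pn) (r - 1))
    (hs : pvOk (9 ^ pn) s) (hs' : ¬ pvOk (9 ^ pn) (s - 1)) : r = s := by
  rcases lt_trichotomy r s with h | h | h
  · exact absurd (pvOkMono pn r (s - 1) hr1 (by omega) hr) hs'
  · exact h
  · exact absurd (pvOkMono pn s (r - 1) hs1 (by omega) hs) hr'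

theorem pvOkZero (p : Int) : ¬ pvOk p 0 := by simp [pvOk]

-- exponential search returns an ok value whose tested predecessor (its half, unless it is the start) fails
theorem pvExp_spec (pn : Nat) :
    ∀ (fuel hi : Nat), 1 ≤ hi → 2 * pn + 2 - hi < fuel →
      pvOk (9 ^ pn) (pvExp (9 ^ pn) fuel hi) ∧ hi ≤ pvExp (9 ^ pn) fuel hi ∧
        (pvExp (9 ^ pn) fuel hi = hi ∨ ¬ pvOk (9 ^ pn) (pvExp (9 ^ pn) fuel hi / 2)) := by
  intro fuel
  induction fuel with
  | zero => intro hi h1 hk; omega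
  | succ fuel ih =>
    intro hi h1 hk
    by_cases hc : pvOk (9 ^ pn) hi
    · rw [pvExp, if_pos hc]; exact ⟨hc, le_refl _, Or.inl rfl⟩
    · rw [pvExp, if_neg hc]
      have hlt : hi < 2 * pn + 2 := pvKeyInt pn hi hc
      obtain ⟨hok, hle, hor⟩ := ih (hi * 2) (by omega) (by omega)
      refine ⟨hok, by omega, ?_⟩
      rcases hor with he | hno
      · right; rw [he]; have h2 : hi * 2 / 2 = hi := by omega
        rwa [h2]
      · exact Or.inr hno

-- binary search keeps ¬ok lo ∧ ok hi and returns the crossing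
theorem pvBin_spec (p : Int) :
    ∀ (fuel lo hi : Nat), hi - lo ≤ fuel → ¬ pvOk p lo → pvOk p hi → lo < hi →
      pvOk p (pvBin p fuel lo hi) ∧ ¬ pvOk p (pvBin p fuel lo hi - 1) ∧ lo < pvBin p fuel lo hi := by
  intro fuel
  induction fuel with
  | zero => intro lo hi hk _ _ hlh; omega
  | succ fuel ih =>
    intro lo hi hk hlo hhi hlh
    by_cases hc : lo + 1 < hi
    · rw [pvBin, if_pos hc]
      by_cases hm : pvOk p ((lo + hi) / 2)
      · rw [if_pos hm]
        exact ih lo ((lo + hi) / 2) (by omega) hlo hm (by omega)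
      · rw [if_neg hm]
        obtain ⟨a, b, c⟩ := ih ((lo + hi) / 2) hi (by omega) hm hhi (by omega)
        exact ⟨a, b, by omega⟩
    · rw [pvBin, if_neg hc]
      have h1 : hi - 1 = lo := by omega
      exact ⟨hhi, by rwa [h1], hlh⟩

-- B computes 9^pn times the unique crossing digit
theorem pvAltChar (power : Int) :
    ∃ r : Nat, 1 ≤ r ∧ pvOk (9 ^ power.toNat) r ∧ ¬ pvOk (9 ^ power.toNat) (r - 1) ∧
      assume_threshold_alt power = 9 ^ power.toNat * (r : Int) := by
  obtain ⟨hok, hge, hor⟩ := pvExp_spec power.toNat (2 * power.toNat + 2) 1 (le_refl 1) (by omega)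
  set H := pvExp (9 ^ power.toNat) (2 * power.toNat + 2) 1 with hH
  have hlo : ¬ pvOk (9 ^ power.toNat) (H / 2) := by
    rcases hor with he | hno
    · rw [he]; exact pvOkZero _
    · exact hno
  obtain ⟨a, b, c⟩ := pvBin_spec (9 ^ power.toNat) H (H / 2) H (by omega) hlo hok (by omega)
  exact ⟨pvBin (9 ^ power.toNat) H (H / 2) H, by omega, a, b, rfl⟩

-- A's linear scan reaches the same crossing digit
theorem pvLoopAChar (power : Int) :
    ∀ (fuel digit : Nat), 1 ≤ digit → 2 * power.toNat + 2 - digit < fuel →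
      ¬ pvOk (9 ^ power.toNat) (digit - 1) →
      ∃ r : Nat, 1 ≤ r ∧ pvOk (9 ^ power.toNat) r ∧ ¬ pvOk (9 ^ power.toNat) (r - 1) ∧
        pvLoopA power fuel digit = 9 ^ power.toNat * (r : Int) := by
  intro fuel
  induction fuel with
  | zero => intro digit h1 hk hprev; omega
  | succ fuel ih =>
    intro digit h1 hk hprev
    rw [pvLoopA]
    simp only [pvSumA]
    by_cases hok : pvOk (9 ^ power.toNat) digit
    · refine ⟨digit, h1, hok, hprev, ?_⟩
      unfold pvOk at hok
      rw [if_pos hok]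
    · have hlt := pvKeyInt power.toNat digit (by unfold pvOk at hok; exact hok)
      have hok' := hok
      unfold pvOk at hok'
      rw [if_neg hok']
      exact ih (digit + 1) (by omega) (by omega) (by simpa using hok)

-- ===== VERDICT (by name: the statement is the Claim_ definition above) =====
theorem assume_threshold_spec : Claim_equal_assume_threshold := by
  intro power _ _
  unfold Spec_assume_threshold assume_threshold
  obtain ⟨r, hr1, hrok, hrprev, hrA⟩ :=
    pvLoopAChar power (2 * power.toNat + 2) 1 (le_refl 1) (by omega) (by simp [pvOk])
  obtain ⟨s, hs1, hsok, hsprev, hsB⟩ := pvAltChar power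
  rw [hrA, hsB, pvUniq power.toNat r s hr1 hs1 hrok hrprev hsok hsprev]
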